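-- pv_equiv track=rewrite | github.com/soomin-kevin-sung/Practice_Python | 0. 수동으로 올리던 코드/BJ1700.py | get_release_concent
-- ===== SOURCE A (Python) =====
-- def get_release_concent(used, levels):
--     last_obj = 0
--     last_level = 0
--     for used_obj in used:
--         if levels[used_obj]:
--             if levels[used_obj][0] > last_level:
--                 last_level = levels[used_obj][0]
--                 last_obj = used_obj
--         else:
--             last_obj = used_obj
--             break
--
--     return last_obj
-- ===== SOURCE B (Python) =====
-- def get_release_concent(used, levels):
--     # Pass 1: an object with no remaining uses is evicted immediately (A's break).
--     for obj in used:
--         if not levels[obj]: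
--             return obj
--     # Pass 2: no such object; evict the first object with the farthest next use.
--     best_level = 0
--     best_obj = 0
--     for obj in used:
--         if levels[obj][0] > best_level:
--             best_level = levels[obj][0]
--             best_obj = obj
--     return best_obj
-- ===== Notes on version B (the rewrite author's own statement) =====
-- stated objective: alternative
-- what changed: Replaces A's single fused loop with break and carried (last_obj,last_level) state by two independent passes: an early-return scan for the first object with no remaining uses, then a pure argmax pass over next-use levels.
import Mathlib
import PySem

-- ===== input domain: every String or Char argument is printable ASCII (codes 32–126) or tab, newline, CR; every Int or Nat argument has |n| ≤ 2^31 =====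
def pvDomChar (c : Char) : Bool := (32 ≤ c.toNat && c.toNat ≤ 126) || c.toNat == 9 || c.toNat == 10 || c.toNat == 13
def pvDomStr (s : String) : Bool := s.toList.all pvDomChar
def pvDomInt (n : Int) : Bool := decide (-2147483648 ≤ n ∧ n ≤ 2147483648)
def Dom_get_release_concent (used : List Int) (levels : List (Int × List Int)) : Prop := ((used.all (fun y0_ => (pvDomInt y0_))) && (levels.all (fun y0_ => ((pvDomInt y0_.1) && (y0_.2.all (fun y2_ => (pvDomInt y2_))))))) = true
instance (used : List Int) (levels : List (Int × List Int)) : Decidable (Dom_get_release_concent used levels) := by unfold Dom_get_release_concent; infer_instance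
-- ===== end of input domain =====

-- B replaces A's single fused loop (break + carried max state) by two independent passes:
-- an early-return scan for the first object with no remaining uses, then a pure argmax pass.
-- Equivalence is proved on Pre_ (no KeyError); objective: alternative decomposition, same cost.

-- ===== PORT A =====
-- dict lookup levels[k] (first match in the association list); none = KeyError
def pvLookup (levels : List (Int × List Int)) (k : Int) : Option (List Int) :=
  match levels with
  | [] => none
  | (k', v) :: rest => if k' == k then some v else pvLookup rest k

-- A's single loop, carrying (last_obj, last_level); 'break' returns immediately
def goA (levels : List (Int × List Int)) : List Int → Int → Int → Int
  | [], last_obj, _ => last_obj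
  | o :: rest, last_obj, last_level =>
    match pvLookup levels o with
    | none => last_obj            -- KeyError in Python; outside Pre_
    | some [] => o                -- break
    | some (v :: _) =>
      if v > last_level then goA levels rest o v else goA levels rest last_obj last_level

def get_release_concent (used : List Int) (levels : List (Int × List Int)) : Int :=
  goA levels used 0 0

-- ===== PORT B =====
-- pass 1: first object whose entry is empty (KeyError, outside Pre_, stops the scan)
def goB1 (levels : List (Int × List Int)) : List Int → Option Int
  | [] => none
  | o :: rest =>
    match pvLookup levels o with
    | none => none                -- KeyError in Python; outside Pre_
    | some [] => some o
    | some (_ :: _) => goB1 levels rest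

-- pass 2: argmax of the next-use level, strict > so the first maximizer wins
def goB2 (levels : List (Int × List Int)) : List Int → Int → Int → Int
  | [], _, best_obj => best_obj
  | o :: rest, best_level, best_obj =>
    match pvLookup levels o with
    | some (v :: _) =>
      if v > best_level then goB2 levels rest v o else goB2 levels rest best_level best_obj
    | _ => goB2 levels rest best_level best_obj   -- unreachable when pass 1 found nothing

def get_release_concent_alt (used : List Int) (levels : List (Int × List Int)) : Int :=
  match goB1 levels used with
  | some o => o
  | none => goB2 levels used 0 0

-- ===== PRECONDITION & SPEC =====
-- Pre_ excludes exactly the inputs on which A raises KeyError: some element of `used`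
-- is missing from `levels` while every earlier element has a nonempty entry (the loop
-- only reaches an element while no earlier entry was empty).
def Pre_get_release_concent (used : List Int) (levels : List (Int × List Int)) : Prop :=
  ∀ i, i < used.length →
    (∀ j, j < i → ∃ p, levels.find? (fun q => q.1 == used.getD j 0) = some p ∧ p.2 ≠ []) →
    (levels.find? (fun q => q.1 == used.getD i 0)).isSome

instance (used : List Int) (levels : List (Int × List Int)) : Decidable (Pre_get_release_concent used levels) := by unfold Pre_get_release_concent; infer_instance

def pvWitness_get_release_concent : List Int × (List (Int × List Int)) :=
  ([1, 2, 1], [(1, [3, 5]), (2, [4])])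

def Spec_get_release_concent (used : List Int) (levels : List (Int × List Int)) (out : Int) : Prop := out = get_release_concent_alt used levels
instance (used : List Int) (levels : List (Int × List Int)) (out : Int) : Decidable (Spec_get_release_concent used levels out) := by unfold Spec_get_release_concent; infer_instance

-- ===== CLAIM (what is proved, stated in full; the proofs are below) =====
def Claim_equal_get_release_concent : Prop := ∀ (used : List Int) (levels : List (Int × List Int)), Dom_get_release_concent used levels → Pre_get_release_concent used levels → Spec_get_release_concent used levels (get_release_concent used levels)

-- ===== LEMMAS AND PROOFS =====

-- the ports' dict lookup is the first matching entry of the association list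
lemma pvLookup_eq_find? (levels : List (Int × List Int)) (k : Int) :
    pvLookup levels k = (levels.find? (fun q => q.1 == k)).map (·.2) := by
  induction levels with
  | nil => simp [pvLookup]
  | cons p rest ih =>
    obtain ⟨k', v⟩ := p
    by_cases h : k' = k
    · simp [pvLookup, List.find?, h]
    · have hb : (k' == k) = false := by simpa using h
      simp [pvLookup, List.find?, hb, ih]

-- shifting Pre_ past a head element with a nonempty entry
lemma pre_tail (o : Int) (rest : List Int) (levels : List (Int × List Int))
    (l : List Int) (hl : pvLookup levels o = some l) (hne : l ≠ [])
    (h : Pre_get_release_concent (o :: rest) levels) :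
    Pre_get_release_concent rest levels := by
  intro i hi hj
  have := h (i + 1) (by simpa using Nat.succ_lt_succ hi) ?_
  · simpa using this
  · intro j hj'
    cases j with
    | zero =>
      rw [pvLookup_eq_find?] at hl
      obtain ⟨p, hp, hpl⟩ := Option.map_eq_some_iff.mp hl
      exact ⟨p, by simpa using hp, by simp [hpl, hne]⟩
    | succ j' =>
      have := hj j' (by omega)
      simpa using this

-- main invariant: A's fused loop equals B's two passes, for any carried state
lemma goA_eq (levels : List (Int × List Int)) :
    ∀ (used : List Int) (lo ll : Int), Pre_get_release_concent used levels →
      goA levels used lo ll =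
        (match goB1 levels used with
         | some o => o
         | none => goB2 levels used ll lo) := by
  intro used
  induction used with
  | nil => intro lo ll _; simp [goA, goB1, goB2]
  | cons o rest ih =>
    intro lo ll hpre
    have h0 : (pvLookup levels o).isSome := by
      have := hpre 0 (by simp) (by intro j hj; omega)
      simpa [pvLookup_eq_find?] using this
    cases hl : pvLookup levels o with
    | none => simp [hl] at h0
    | some l =>
      cases l with
      | nil => simp [goA, goB1, hl]
      | cons v vs =>
        have htail : Pre_get_release_concent rest levels :=
          pre_tail o rest levels (v :: vs) hl (by simp) hpre
        simp only [goA, goB1, goB2, hl]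
        by_cases hv : v > ll
        · simp only [if_pos hv]; exact ih o v htail
        · simp only [if_neg hv]; exact ih lo ll htail

-- ===== VERDICT (by name: the statement is the Claim_ definition above) =====
theorem get_release_concent_spec : Claim_equal_get_release_concent := by
  intro used levels _ hpre
  unfold Spec_get_release_concent get_release_concent get_release_concent_alt
  exact goA_eq levels used 0 0 hpre
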